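-- pv_equiv track=rewrite | github.com/duttbito/Tactego | project.py | insert_blue_player_to_the_grid
-- ===== SOURCE A (Python) =====
-- def insert_blue_player_to_the_grid(grid, h, w, player_list):
--
--     blue_player_grid = grid
--     n = 0
--     #used to enter row of the board
--     for i in range(h - 1, -1, -1):
--         #used to enter column of the board
--         for j in range(0, w):
--             if n <= len(player_list) - 1:
--                 blue_player_grid[i][j] = player_list[n]
--                 n = n + 1
--
--     return blue_player_grid
-- ===== SOURCE B (Python) =====
-- def insert_blue_player_to_the_grid(grid, h, w, player_list):
--     k = min(len(player_list), h * w) if h > 0 and w > 0 else 0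
--     for n in range(k):
--         grid[h - 1 - n // w][n % w] = player_list[n]
--     return grid
-- ===== Notes on version B (the rewrite author's own statement) =====
-- stated objective: simpler
-- what changed: B replaces A's scan over all h*w grid cells with a write-counter by a single loop over the first min(len(player_list), h*w) players that computes each player's grid position arithmetically (row h-1-n//w, column n%w); mutation of grid happens in both, equivalence is about the returned value.
import Mathlib
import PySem

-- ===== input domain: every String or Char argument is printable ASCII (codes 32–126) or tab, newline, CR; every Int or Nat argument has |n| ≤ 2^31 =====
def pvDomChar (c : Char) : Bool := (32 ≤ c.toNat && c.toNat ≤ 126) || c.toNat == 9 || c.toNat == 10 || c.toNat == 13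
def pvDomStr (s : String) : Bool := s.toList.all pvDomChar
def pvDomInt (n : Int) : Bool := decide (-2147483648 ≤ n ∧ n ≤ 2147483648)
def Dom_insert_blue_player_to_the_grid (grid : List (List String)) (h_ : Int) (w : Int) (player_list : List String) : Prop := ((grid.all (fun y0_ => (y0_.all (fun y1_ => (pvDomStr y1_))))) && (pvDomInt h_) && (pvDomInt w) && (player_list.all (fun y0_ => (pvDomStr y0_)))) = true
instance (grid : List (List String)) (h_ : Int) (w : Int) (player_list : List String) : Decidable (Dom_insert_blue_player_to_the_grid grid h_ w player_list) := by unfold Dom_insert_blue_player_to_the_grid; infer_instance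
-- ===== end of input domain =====

-- B fills the grid by one loop over the players, computing each position arithmetically,
-- instead of A's scan over all grid cells with a write-counter (simpler decomposition).
-- Both Pythons mutate `grid` in place identically; the equivalence proved is about the returned value.

-- `grid[i][j] = v` (shared low-level write; pySetD/pyGetD are no-ops out of range — Pre_ excludes that)
def pvWrite (g : List (List String)) (i j : Int) (v : String) : List (List String) :=
  PySem.List.pySetD g i (PySem.List.pySetD (PySem.List.pyGetD g i []) j v)

-- ===== PORT A =====
def insert_blue_player_to_the_grid (grid : List (List String)) (h_ : Int) (w : Int) (player_list : List String) : List (List String) :=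
  ((PySem.List.pyRange (h_ - 1) (-1) (-1)).foldl
    (fun (st : List (List String) × Int) i =>
      (PySem.List.pyRange 0 w 1).foldl
        (fun st j =>
          if st.2 ≤ (player_list.length : Int) - 1 then
            (pvWrite st.1 i j (PySem.List.pyGetD player_list st.2 ""), st.2 + 1)
          else st)
        st)
    (grid, 0)).1

-- ===== PORT B =====
def insert_blue_player_to_the_grid_alt (grid : List (List String)) (h_ : Int) (w : Int) (player_list : List String) : List (List String) :=
  (PySem.List.pyRange 0 (if 0 < h_ ∧ 0 < w then min (player_list.length : Int) (h_ * w) else 0) 1).foldl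
    (fun g n =>
      pvWrite g (h_ - 1 - PySem.Int.floordiv n w) (PySem.Int.mod n w)
        (PySem.List.pyGetD player_list n ""))
    grid

-- ===== PRECONDITION & SPEC =====
-- Pre_ excludes exactly the inputs on which Python A raises IndexError: some written
-- cell (row h-1-n/w, column n%w for a written player index n) lies outside the grid.
def Pre_insert_blue_player_to_the_grid (grid : List (List String)) (h_ : Int) (w : Int) (player_list : List String) : Prop :=
  ∀ n ∈ List.range (min player_list.length (h_.toNat * w.toNat)),
    h_.toNat - 1 - n / w.toNat < grid.length ∧
    n % w.toNat < (grid.getD (h_.toNat - 1 - n / w.toNat) []).length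
instance (grid : List (List String)) (h_ : Int) (w : Int) (player_list : List String) : Decidable (Pre_insert_blue_player_to_the_grid grid h_ w player_list) := by unfold Pre_insert_blue_player_to_the_grid; infer_instance

def pvWitness_insert_blue_player_to_the_grid : List (List String) × Int × Int × List String :=
  ([["x", "x"], ["y", "y"]], 2, 2, ["a", "b", "c"])

def Spec_insert_blue_player_to_the_grid (grid : List (List String)) (h_ : Int) (w : Int) (player_list : List String) (out : List (List String)) : Prop := out = insert_blue_player_to_the_grid_alt grid h_ w player_list
instance (grid : List (List String)) (h_ : Int) (w : Int) (player_list : List String) (out : List (List String)) : Decidable (Spec_insert_blue_player_to_the_grid grid h_ w player_list out) := by unfold Spec_insert_blue_player_to_the_grid; infer_instance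

-- ===== CLAIM (what is proved, stated in full; the proofs are below) =====
def Claim_equal_insert_blue_player_to_the_grid : Prop := ∀ (grid : List (List String)) (h_ : Int) (w : Int) (player_list : List String), Dom_insert_blue_player_to_the_grid grid h_ w player_list → Pre_insert_blue_player_to_the_grid grid h_ w player_list → Spec_insert_blue_player_to_the_grid grid h_ w player_list (insert_blue_player_to_the_grid grid h_ w player_list)

-- ===== LEMMAS AND PROOFS =====

-- A's loop body as a function of the cell coordinate
def pvStepA (pl : List String) (st : List (List String) × Int) (c : Int × Int) : List (List String) × Int :=
  if st.2 ≤ (pl.length : Int) - 1 then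
    (pvWrite st.1 c.1 c.2 (PySem.List.pyGetD pl st.2 ""), st.2 + 1)
  else st

def pvWr (g : List (List String)) (cp : (Int × Int) × String) : List (List String) :=
  pvWrite g cp.1.1 cp.1.2 cp.2

-- A's counter-guarded fold over a cell list is the plain fold over cells zipped with players
theorem pv_A_zip (pl : List String) (cs : List (Int × Int)) (g : List (List String)) (n : Nat) :
    cs.foldl (pvStepA pl) (g, (n : Int)) =
      ((cs.zip (pl.drop n)).foldl pvWr g, ((n + min cs.length (pl.length - n) : Nat) : Int)) := by
  induction cs generalizing g n with
  | nil => simp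
  | cons c cs ih =>
    by_cases hn : n < pl.length
    · have hdrop : pl.drop n = pl[n] :: pl.drop (n + 1) := (List.getElem_cons_drop hn).symm
      have hcond : (n : Int) ≤ (pl.length : Int) - 1 := by omega
      simp only [List.foldl_cons, pvStepA, hcond, if_pos, hdrop, List.zip_cons_cons]
      have : ((n : Int) + 1) = ((n + 1 : Nat) : Int) := by omega
      rw [this, ih]
      simp only [Prod.mk.injEq]
      constructor
      · congr 1
        simp [pvWr, List.getElem?_eq_getElem hn]
      · simp only [List.length_cons]
        congr 1
        omega
    · have hcond : ¬ ((n : Int) ≤ (pl.length : Int) - 1) := by omega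
      have hdrop : pl.drop n = [] := List.drop_eq_nil_of_le (by omega)
      simp only [List.foldl_cons, pvStepA, hcond, if_neg, not_false_iff, hdrop]
      rw [ih, hdrop]
      have h0 : pl.length - n = 0 := by omega
      simp [h0]

theorem pv_foldl_id {α β : Type} (l : List α) (s : β) : l.foldl (fun s _ => s) s = s := by
  induction l generalizing s with
  | nil => rfl
  | cons x xs ih => simp only [List.foldl_cons]; exact ih s

theorem pv_foldl_flatMap {α β γ : Type} (xs : List α) (f : α → List β) (op : γ → β → γ) (init : γ) :
    xs.foldl (fun acc x => (f x).foldl op acc) init = (xs.flatMap f).foldl op init := by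
  induction xs generalizing init with
  | nil => rfl
  | cons x xs ih => simp [List.foldl_cons, List.flatMap_cons, List.foldl_append, ih]

theorem pv_flatMap_range_range {α : Type} (H W : Nat) (f : Nat → Nat → α) :
    (List.range H).flatMap (fun k => (List.range W).map (fun j => f k j))
      = (List.range (H * W)).map (fun n => f (n / W) (n % W)) := by
  induction H with
  | zero => simp
  | succ H ih =>
    rw [List.range_succ, List.flatMap_append, ih, Nat.succ_mul, List.range_add, List.map_append]
    congr 1
    · simp only [List.flatMap_cons, List.flatMap_nil, List.append_nil, List.map_map]
      refine List.map_congr_left ?_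
      intro j hj
      have hjW : j < W := List.mem_range.mp hj
      have hW : 0 < W := by omega
      have hdiv : (H * W + j) / W = H := by
        rw [Nat.add_comm, Nat.add_mul_div_right _ _ hW, Nat.div_eq_of_lt hjW, Nat.zero_add]
      simp [Function.comp, Nat.mod_eq_of_lt hjW, hdiv]

theorem pv_zip_range (M : Nat) (pl : List String) :
    (List.range M).zip pl = (List.range (min M pl.length)).map (fun n => (n, pl.getD n "")) := by
  apply List.ext_getElem
  · simp
  · intro i h1 h2
    have hi : i < min M pl.length := by simpa using h2
    have hiM : i < M := by omega
    have hip : i < pl.length := by omega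
    simp [List.getElem_zip, List.getElem_range, List.getD, List.getElem?_eq_getElem hip]

theorem pv_nested_eq (pl : List String) (H W : Nat) (h_ : Int) (g : List (List String)) (n0 : Int) :
    (List.range H).foldl
      (fun st (k : Nat) => (List.range W).foldl (fun st (j : Nat) => pvStepA pl st (h_ - 1 - (k : Int), (j : Int))) st)
      (g, n0)
    = ((List.range (H * W)).map
        (fun n => (h_ - 1 - ((n / W : Nat) : Int), ((n % W : Nat) : Int)))).foldl (pvStepA pl) (g, n0) :=
  calc
    (List.range H).foldl
      (fun st (k : Nat) => (List.range W).foldl (fun st (j : Nat) => pvStepA pl st (h_ - 1 - (k : Int), (j : Int))) st)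
      (g, n0)
        = (List.range H).foldl
            (fun st (k : Nat) =>
              ((List.range W).map (fun (j : Nat) => (h_ - 1 - (k : Int), (j : Int)))).foldl (pvStepA pl) st)
            (g, n0) := by simp only [List.foldl_map]
    _ = ((List.range H).flatMap
          (fun (k : Nat) => (List.range W).map (fun (j : Nat) => (h_ - 1 - (k : Int), (j : Int))))).foldl
            (pvStepA pl) (g, n0) :=
        pv_foldl_flatMap (List.range H) _ (pvStepA pl) (g, n0)
    _ = ((List.range (H * W)).map
          (fun n => (h_ - 1 - ((n / W : Nat) : Int), ((n % W : Nat) : Int)))).foldl (pvStepA pl) (g, n0) := by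
        rw [pv_flatMap_range_range H W (fun k j => (h_ - 1 - (k : Int), (j : Int)))]

-- ===== VERDICT (by name: the statement is the Claim_ definition above) =====
theorem insert_blue_player_to_the_grid_spec : Claim_equal_insert_blue_player_to_the_grid := by
  intro grid h_ w pl _dom _pre
  unfold Spec_insert_blue_player_to_the_grid insert_blue_player_to_the_grid insert_blue_player_to_the_grid_alt
  by_cases hpos : 0 < h_ ∧ 0 < w
  · obtain ⟨hh0, hw0⟩ := hpos
    have hhc : h_ = (h_.toNat : Int) := (Int.toNat_of_nonneg (le_of_lt hh0)).symm
    have hwc : w = (w.toNat : Int) := (Int.toNat_of_nonneg (le_of_lt hw0)).symm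
    set H := h_.toNat with hH
    set W := w.toNat with hW
    have hWpos : 0 < W := by omega
    -- A side
    have hA :
        ((PySem.List.pyRange (h_ - 1) (-1) (-1)).foldl
          (fun (st : List (List String) × Int) i =>
            (PySem.List.pyRange 0 w 1).foldl
              (fun st j =>
                if st.2 ≤ (pl.length : Int) - 1 then
                  (pvWrite st.1 i j (PySem.List.pyGetD pl st.2 ""), st.2 + 1)
                else st) st)
          (grid, 0)).1
        = (List.range (min (H * W) pl.length)).foldl
            (fun g n => pvWrite g (h_ - 1 - ((n / W : Nat) : Int)) ((n % W : Nat) : Int) (pl.getD n "")) grid := by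
      rw [PySem.List.pyRange_neg_one, PySem.List.pyRange_one]
      rw [show h_ - 1 - (-1) = (H : Int) from by omega, show w - 0 = (W : Int) from by omega]
      simp only [Int.toNat_natCast, List.foldl_map, zero_add]
      have hnest := pv_nested_eq pl H W h_ grid 0
      simp only [pvStepA] at hnest
      rw [hnest]
      have hz := pv_A_zip pl ((List.range (H * W)).map
        (fun n => (h_ - 1 - ((n / W : Nat) : Int), ((n % W : Nat) : Int)))) grid 0
      simp only [Nat.cast_zero, List.drop_zero] at hz
      rw [hz]
      rw [List.zip_map_left, pv_zip_range, List.map_map, List.foldl_map]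
      simp [pvWr]
    rw [hA, if_pos (⟨hh0, hw0⟩ : 0 < h_ ∧ 0 < w), PySem.List.pyRange_one]
    have hhw : h_ * w = ((H * W : Nat) : Int) := by rw [hhc, hwc]; push_cast; ring
    rw [show (min (pl.length : Int) (h_ * w) - 0).toNat = min (H * W) pl.length from by omega]
    rw [List.foldl_map]
    refine PySem.List.foldl_congr_mem _ _ _ _ ?_
    intro g n _
    rw [hwc]
    simp [PySem.Int.floordiv_natCast, PySem.Int.mod_natCast]
  · -- no cell is ever visited: both sides return the grid unchanged
    rw [if_neg hpos]
    rw [PySem.List.pyRange_one_eq_nil (by omega : (0:Int) ≤ 0)]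
    have hcase : h_ ≤ 0 ∨ w ≤ 0 := by
      rcases not_and_or.mp hpos with h | h <;> [left; right] <;> omega
    rcases hcase with hne | hne
    · rw [PySem.List.pyRange_neg_one_eq_nil (by omega : h_ - 1 ≤ -1)]
      rfl
    · rw [PySem.List.pyRange_one_eq_nil (by omega : w ≤ 0)]
      simp only [List.foldl_nil]
      rw [pv_foldl_id]
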